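-- pv_equiv track=rewrite | github.com/Dashkako/Homework | DZ3.py | lists
-- ===== SOURCE A (Python) =====
-- def lists(count:int, nums:list)->tuple:
--     otr = list()
--     not_otr = list()
--     for i in nums:
--         if i < 0:
--             otr.append(i)
--         else:
--             not_otr.append(i)
--     return sorted(otr, reverse=True), sorted(not_otr)
-- ===== SOURCE B (Python) =====
-- def lists(count: int, nums: list) -> tuple:
--     s = sorted(nums)
--     return [x for x in reversed(s) if x < 0], [x for x in s if x >= 0]
-- ===== Notes on version B (the rewrite author's own statement) =====
-- stated objective: simpler
-- what changed: B sorts the whole list once and derives both outputs from the single sorted list (reversed-scan for the descending negatives, forward scan for the ascending non-negatives), instead of A's partition loop followed by two separate sorts.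
import Mathlib
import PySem

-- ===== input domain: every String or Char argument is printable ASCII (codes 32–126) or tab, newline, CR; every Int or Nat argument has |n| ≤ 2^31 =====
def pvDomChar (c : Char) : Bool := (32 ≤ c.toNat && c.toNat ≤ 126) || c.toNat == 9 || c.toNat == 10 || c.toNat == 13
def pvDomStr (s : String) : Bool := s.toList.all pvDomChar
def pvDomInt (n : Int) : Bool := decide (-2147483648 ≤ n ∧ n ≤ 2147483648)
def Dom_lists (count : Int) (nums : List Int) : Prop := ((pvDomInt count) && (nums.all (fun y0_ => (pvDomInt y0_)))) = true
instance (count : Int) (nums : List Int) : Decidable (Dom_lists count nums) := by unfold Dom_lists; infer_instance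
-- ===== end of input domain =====

-- B sorts the list once and derives both outputs (reversed-scan negatives, forward-scan non-negatives) from it; objective: simpler.


-- ===== PORT A =====
-- partition loop into (otr, not_otr), then sort each
def lists (count : Int) (nums : List Int) : List Int × List Int :=
  let st := nums.foldl
    (fun (st : List Int × List Int) i =>
      if i < 0 then (st.1 ++ [i], st.2) else (st.1, st.2 ++ [i]))
    ([], [])
  (PySem.List.sorted st.1 (fun x => x) true, PySem.List.sorted st.2 (fun x => x) false)

-- ===== PORT B =====
-- one full sort, then two sign-based scans (B's reversed(s) scan is reverse-then-filter)
def lists_alt (count : Int) (nums : List Int) : List Int × List Int :=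
  let s := PySem.List.sorted nums (fun x => x) false
  (s.reverse.filter (fun x => decide (x < 0)), s.filter (fun x => decide (0 ≤ x)))

-- ===== PRECONDITION & SPEC =====
def Spec_lists (count : Int) (nums : List Int) (out : List Int × List Int) : Prop := out = lists_alt count nums
instance (count : Int) (nums : List Int) (out : List Int × List Int) : Decidable (Spec_lists count nums out) := by unfold Spec_lists; infer_instance

-- ===== CLAIM (what is proved, stated in full; the proofs are below) =====
def Claim_equal_lists : Prop := ∀ (count : Int) (nums : List Int), Dom_lists count nums → Spec_lists count nums (lists count nums)

-- ===== LEMMAS AND PROOFS =====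

-- A's partition loop is filtering by sign
theorem pv_fold_partition (nums : List Int) (a b : List Int) :
    nums.foldl (fun (st : List Int × List Int) i =>
      if i < 0 then (st.1 ++ [i], st.2) else (st.1, st.2 ++ [i])) (a, b)
    = (a ++ nums.filter (fun x => decide (x < 0)),
       b ++ nums.filter (fun x => decide (0 ≤ x))) := by
  induction nums generalizing a b with
  | nil => simp
  | cons x xs ih =>
    by_cases hx : x < 0
    · simp [hx, not_le.mpr hx, ih]
    · simp [hx, not_lt.mp hx, ih]

-- Python's reverse sort on Int with identity key is characterised by perm + descending order
theorem pv_sorted_rev_ge (xs ys : List Int) (h : ys.Perm xs)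
    (hp : ys.Pairwise (fun a b => b ≤ a)) :
    PySem.List.sorted xs (fun x => x) true = ys :=
  List.Perm.eq_of_pairwise (fun a b _ _ h1 h2 => le_antisymm h2 h1)
    (PySem.List.sorted_pairwise_rev xs (fun x => x)) hp
    ((PySem.List.sorted_perm xs _ true).trans h.symm)

-- ===== VERDICT (by name: the statement is the Claim_ definition above) =====
theorem lists_spec : Claim_equal_lists := by
  intro count nums _
  unfold Spec_lists lists lists_alt
  simp only [pv_fold_partition, List.nil_append, List.filter_reverse]
  refine Prod.ext ?_ ?_
  · exact pv_sorted_rev_ge _ _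
      (((List.filter _ (PySem.List.sorted nums (fun x => x) false)).reverse_perm).trans
        ((PySem.List.sorted_perm nums (fun x => x) false).filter _))
      (List.pairwise_reverse.mpr
        ((PySem.List.sorted_pairwise nums (fun x => x)).filter _))
  · exact PySem.List.sorted_id_eq_of_perm_of_pairwise _ _
      ((PySem.List.sorted_perm nums (fun x => x) false).filter _)
      ((PySem.List.sorted_pairwise nums (fun x => x)).filter _)
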